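-- pv_equiv track=rewrite | github.com/Khushal-Nikhare/INTERVIEW_PREP | backend/analysis.py | get_improvements
-- ===== SOURCE A (Python) =====
-- from typing import List, Dict, Tuple
--
-- def get_improvements(weaknesses: List[str]) -> List[str]:
--     """Map weaknesses to actionable improvements"""
--     improvements = []
--
--     if any("filler" in w.lower() for w in weaknesses):
--         improvements.append("Practice speaking with pauses instead of filler words")
--         improvements.append("Record yourself and count filler words to build awareness")
--
--     if any("brief" in w.lower() or "shallow" in w.lower() or "depth" in w.lower() for w in weaknesses):
--         improvements.append("Use the STAR method (Situation, Task, Action, Result) for answers")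
--         improvements.append("Add concrete examples and numbers to your responses")
--
--     if any("technical" in w.lower() for w in weaknesses):
--         improvements.append("Study core technical concepts and practice explaining them")
--         improvements.append("Use technical terminology naturally in your responses")
--
--     if any("sentence" in w.lower() for w in weaknesses):
--         improvements.append("Practice clear, structured communication")
--         improvements.append("Break complex ideas into digestible points")
--
--     return improvements if improvements else [
--         "Continue practicing mock interviews",
--         "Focus on clarity and confidence"
--     ]
-- ===== SOURCE B (Python) =====
-- def get_improvements(weaknesses):
--     # Single pass over the weaknesses: accumulate one flag per suggestion group.
--     filler = star = tech = comm = False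
--     for w in weaknesses:
--         lw = w.lower()
--         filler = filler or "filler" in lw
--         star = star or "brief" in lw or "shallow" in lw or "depth" in lw
--         tech = tech or "technical" in lw
--         comm = comm or "sentence" in lw
--     tips = [
--         (filler, ["Practice speaking with pauses instead of filler words",
--                   "Record yourself and count filler words to build awareness"]),
--         (star, ["Use the STAR method (Situation, Task, Action, Result) for answers",
--                 "Add concrete examples and numbers to your responses"]),
--         (tech, ["Study core technical concepts and practice explaining them",
--                 "Use technical terminology naturally in your responses"]),
--         (comm, ["Practice clear, structured communication",
--                 "Break complex ideas into digestible points"]),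
--     ]
--     out = [line for hit, lines in tips if hit for line in lines]
--     return out or ["Continue practicing mock interviews",
--                    "Focus on clarity and confidence"]
-- ===== Notes on version B (the rewrite author's own statement) =====
-- stated objective: faster
-- what changed: One single pass over the weaknesses accumulating four boolean group flags (transposed traversal), then the output is assembled from the flags; A instead scans the whole list four times, once per suggestion group, lowercasing each weakness on every scan.
import Mathlib
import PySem

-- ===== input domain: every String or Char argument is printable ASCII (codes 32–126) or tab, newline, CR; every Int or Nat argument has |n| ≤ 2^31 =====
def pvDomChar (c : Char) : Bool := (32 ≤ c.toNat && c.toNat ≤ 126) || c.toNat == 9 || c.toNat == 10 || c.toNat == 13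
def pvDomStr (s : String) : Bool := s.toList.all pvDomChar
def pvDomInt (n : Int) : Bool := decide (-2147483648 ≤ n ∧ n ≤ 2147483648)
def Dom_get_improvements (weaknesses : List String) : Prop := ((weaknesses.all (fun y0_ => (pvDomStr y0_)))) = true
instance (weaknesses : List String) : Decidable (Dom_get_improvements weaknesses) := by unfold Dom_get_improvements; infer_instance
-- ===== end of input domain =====

-- B makes one single pass over the weaknesses accumulating four group flags, then builds the
-- output from the flags; A scans the list four times. Same result, different traversal.


-- ===== PORT A =====
def get_improvements (weaknesses : List String) : List String :=
  let improvements : List String := []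
  let improvements :=
    if weaknesses.any (fun w => PySem.Str.isIn "filler" (PySem.Str.lower w)) then
      improvements ++ ["Practice speaking with pauses instead of filler words",
                       "Record yourself and count filler words to build awareness"]
    else improvements
  let improvements :=
    if weaknesses.any (fun w => PySem.Str.isIn "brief" (PySem.Str.lower w)
        || PySem.Str.isIn "shallow" (PySem.Str.lower w)
        || PySem.Str.isIn "depth" (PySem.Str.lower w)) then
      improvements ++ ["Use the STAR method (Situation, Task, Action, Result) for answers",
                       "Add concrete examples and numbers to your responses"]
    else improvements
  let improvements :=
    if weaknesses.any (fun w => PySem.Str.isIn "technical" (PySem.Str.lower w)) then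
      improvements ++ ["Study core technical concepts and practice explaining them",
                       "Use technical terminology naturally in your responses"]
    else improvements
  let improvements :=
    if weaknesses.any (fun w => PySem.Str.isIn "sentence" (PySem.Str.lower w)) then
      improvements ++ ["Practice clear, structured communication",
                       "Break complex ideas into digestible points"]
    else improvements
  if improvements ≠ [] then improvements
  else ["Continue practicing mock interviews", "Focus on clarity and confidence"]

-- ===== PORT B =====
-- single-pass flag update: one step per weakness, or-ing each group's condition into its flag
def altStep (s : Bool × Bool × Bool × Bool) (w : String) : Bool × Bool × Bool × Bool :=
  let lw := PySem.Str.lower w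
  (s.1 || PySem.Str.isIn "filler" lw,
   s.2.1 || PySem.Str.isIn "brief" lw || PySem.Str.isIn "shallow" lw || PySem.Str.isIn "depth" lw,
   s.2.2.1 || PySem.Str.isIn "technical" lw,
   s.2.2.2 || PySem.Str.isIn "sentence" lw)

def get_improvements_alt (weaknesses : List String) : List String :=
  let f := weaknesses.foldl altStep (false, false, false, false)
  let tips : List (Bool × List String) :=
    [ (f.1, ["Practice speaking with pauses instead of filler words",
             "Record yourself and count filler words to build awareness"]),
      (f.2.1, ["Use the STAR method (Situation, Task, Action, Result) for answers",
               "Add concrete examples and numbers to your responses"]),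
      (f.2.2.1, ["Study core technical concepts and practice explaining them",
                 "Use technical terminology naturally in your responses"]),
      (f.2.2.2, ["Practice clear, structured communication",
                 "Break complex ideas into digestible points"]) ]
  let out := tips.flatMap (fun p => if p.1 then p.2 else [])
  if out = [] then ["Continue practicing mock interviews", "Focus on clarity and confidence"]
  else out

-- ===== PRECONDITION & SPEC =====
def Spec_get_improvements (weaknesses : List String) (out : List String) : Prop := out = get_improvements_alt weaknesses
instance (weaknesses : List String) (out : List String) : Decidable (Spec_get_improvements weaknesses out) := by unfold Spec_get_improvements; infer_instance

-- ===== CLAIM =====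
def Claim_equal_get_improvements : Prop := ∀ (weaknesses : List String), Dom_get_improvements weaknesses → Spec_get_improvements weaknesses (get_improvements weaknesses)

-- ===== LEMMAS AND PROOFS =====
-- The fold's flags are exactly the four 'any' scans of A
theorem foldl_altStep (ws : List String) (a b c d : Bool) :
    ws.foldl altStep (a, b, c, d)
      = (a || ws.any (fun w => PySem.Str.isIn "filler" (PySem.Str.lower w)),
         b || ws.any (fun w => PySem.Str.isIn "brief" (PySem.Str.lower w)
              || PySem.Str.isIn "shallow" (PySem.Str.lower w)
              || PySem.Str.isIn "depth" (PySem.Str.lower w)),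
         c || ws.any (fun w => PySem.Str.isIn "technical" (PySem.Str.lower w)),
         d || ws.any (fun w => PySem.Str.isIn "sentence" (PySem.Str.lower w))) := by
  induction ws generalizing a b c d with
  | nil => simp
  | cons x xs ih =>
    simp only [List.foldl_cons, List.any_cons, altStep, ih]
    simp [Bool.or_assoc]

-- ===== VERDICT =====
theorem get_improvements_spec : Claim_equal_get_improvements := by
  intro weaknesses _
  unfold Spec_get_improvements get_improvements get_improvements_alt
  simp only [foldl_altStep, Bool.false_or, List.flatMap_cons, List.flatMap_nil,
    List.append_nil, ne_eq, ite_not, List.nil_append]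
  split_ifs <;> simp_all
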